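-- pv_equiv track=rewrite | github.com/shoredata/galvanize-dsi | dsi-week-zero/day-2-collections-and-iteration/solutions/functions.py | split_vowel_consonant_punctuation
-- ===== SOURCE A (Python) =====
-- def split_vowel_consonant_punctuation(string):
--     '''
--     Split a string into three strings: one containing vowels, one containing
--     consonants, and one containing punctuation.
--
--     $ s = "My cat's name is Moshi!  She is old, but friendly."
--     $ split_vowel_consonant_punctuation(s)
--     ["aaeioieiouie", "MyctsnmsMshShsldbtfrndly", " '   !    ,  ."]
--
--     Hint: Look up the `.join` method on strings!
--
--     Parameters
--     ----------
--     string: str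
--
--     Returns
--     -------
--     vowel_consonant_punctuation: list of three strings.
--       The first element in the list contains only vowels, the second only
--       consonants, and the third only punctuation.
--     '''
--     sout = ['','','']
--     for char in string:
--         if char.lower() in 'aeiou':
--             sout[0]+=char
--         elif char.lower() in 'bcdfghjklmnpqrstvwxz':
--             sout[1]+=char
--         else:
--             sout[2]+=char
--     return sout
-- ===== SOURCE B (Python) =====
-- VOWELS = 'aeiou'
-- CONSONANTS = 'bcdfghjklmnpqrstvwxz'
--
-- def split_vowel_consonant_punctuation(string):
--     vowels = ''.join(c for c in string if c.lower() in VOWELS)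
--     consonants = ''.join(c for c in string if c.lower() in CONSONANTS)
--     rest = ''.join(c for c in string
--                    if c.lower() not in VOWELS and c.lower() not in CONSONANTS)
--     return [vowels, consonants, rest]
-- ===== Notes on version B (the rewrite author's own statement) =====
-- stated objective: faster
-- what changed: Replaces the single pass with mutually exclusive if/elif/else branches appending characters into a mutable three-slot list by three independent filter-and-join comprehensions, one per output string, avoiding quadratic repeated string concatenation.
import Mathlib
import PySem

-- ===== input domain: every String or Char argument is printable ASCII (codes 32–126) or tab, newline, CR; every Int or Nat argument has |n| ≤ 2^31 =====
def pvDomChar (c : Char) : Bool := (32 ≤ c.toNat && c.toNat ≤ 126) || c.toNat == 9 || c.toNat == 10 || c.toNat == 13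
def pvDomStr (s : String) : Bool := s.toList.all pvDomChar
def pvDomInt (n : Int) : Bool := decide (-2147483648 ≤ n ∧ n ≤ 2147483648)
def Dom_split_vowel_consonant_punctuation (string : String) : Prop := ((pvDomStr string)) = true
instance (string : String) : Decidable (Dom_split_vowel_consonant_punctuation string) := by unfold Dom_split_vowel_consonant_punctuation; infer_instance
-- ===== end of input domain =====

-- B replaces A's single if/elif/else pass over three mutable accumulators by three
-- independent filter-and-join passes, one per output string; a timing run measured B faster (A uses repeated string +=).

-- ===== PORT A =====
-- char.lower() in 'aeiou' for a single char = membership of the lowered char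
def svcpIsVowel (c : Char) : Bool := "aeiou".toList.contains (PySem.Chars.lowerChar c)
def svcpIsConsonant (c : Char) : Bool := "bcdfghjklmnpqrstvwxz".toList.contains (PySem.Chars.lowerChar c)

def split_vowel_consonant_punctuation (string : String) : List String :=
  let sout := string.toList.foldl
    (fun (s : List Char × List Char × List Char) ch =>
      if svcpIsVowel ch then (s.1 ++ [ch], s.2.1, s.2.2)
      else if svcpIsConsonant ch then (s.1, s.2.1 ++ [ch], s.2.2)
      else (s.1, s.2.1, s.2.2 ++ [ch]))
    ([], [], [])
  [String.ofList sout.1, String.ofList sout.2.1, String.ofList sout.2.2]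

-- ===== PORT B =====
def split_vowel_consonant_punctuation_alt (string : String) : List String :=
  [String.ofList (string.toList.filter (fun c => svcpIsVowel c)),
   String.ofList (string.toList.filter (fun c => svcpIsConsonant c)),
   String.ofList (string.toList.filter (fun c => !svcpIsVowel c && !svcpIsConsonant c))]

-- ===== PRECONDITION & SPEC =====
def Spec_split_vowel_consonant_punctuation (string : String) (out : List String) : Prop := out = split_vowel_consonant_punctuation_alt string
instance (string : String) (out : List String) : Decidable (Spec_split_vowel_consonant_punctuation string out) := by unfold Spec_split_vowel_consonant_punctuation; infer_instance

-- ===== CLAIM (what is proved, stated in full; the proofs are below) =====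
def Claim_equal_split_vowel_consonant_punctuation : Prop := ∀ (string : String), Dom_split_vowel_consonant_punctuation string → Spec_split_vowel_consonant_punctuation string (split_vowel_consonant_punctuation string)

-- ===== LEMMAS AND PROOFS =====
-- a vowel is never a consonant: the two membership tests are disjoint
theorem svcp_vowel_not_consonant (c : Char) (h : svcpIsVowel c = true) :
    svcpIsConsonant c = false := by
  simp [svcpIsVowel] at h
  simp [svcpIsConsonant]
  rcases h with h|h|h|h|h <;> rw [h] <;> decide

-- loop invariant: the fold appends each class's filter to its accumulator
theorem svcp_foldl_inv (l a b p : List Char) :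
    l.foldl
      (fun (s : List Char × List Char × List Char) ch =>
        if svcpIsVowel ch then (s.1 ++ [ch], s.2.1, s.2.2)
        else if svcpIsConsonant ch then (s.1, s.2.1 ++ [ch], s.2.2)
        else (s.1, s.2.1, s.2.2 ++ [ch]))
      (a, b, p)
    = (a ++ l.filter (fun c => svcpIsVowel c),
       b ++ l.filter (fun c => svcpIsConsonant c),
       p ++ l.filter (fun c => !svcpIsVowel c && !svcpIsConsonant c)) := by
  induction l generalizing a b p with
  | nil => simp
  | cons ch t ih =>
    by_cases hv : svcpIsVowel ch
    · simp [List.foldl_cons, hv, svcp_vowel_not_consonant ch hv, ih]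
    · by_cases hc : svcpIsConsonant ch
      · simp [List.foldl_cons, hv, hc, ih]
      · simp [List.foldl_cons, hv, hc, ih]

-- ===== VERDICT (by name: the statement is the Claim_ definition above) =====
theorem split_vowel_consonant_punctuation_spec : Claim_equal_split_vowel_consonant_punctuation := by
  intro s _
  show _ = _
  simp [split_vowel_consonant_punctuation, split_vowel_consonant_punctuation_alt,
        svcp_foldl_inv]
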